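-- pv_equiv track=rewrite | github.com/gptvibe/Fundamental-Terminal | scripts/benchmark_api_routes.py | _infer_cache_states
-- ===== SOURCE A (Python) =====
-- STATE_HINT_HEADERS = {
--     "cache-status",
--     "x-cache",
--     "x-cache-status",
--     "x-cache-result",
--     "cf-cache-status",
--     "x-vercel-cache",
--     "x-nextjs-cache",
--     "x-cache-hit",
--     "x-cache-state",
--     "x-ft-cache-status",
--     "x-ft-cache-state",
--     "x-hot-cache-status",
-- }
--
-- def _infer_cache_states(headers: dict[str, str]) -> set[str]:
--     states: set[str] = set()
--     for header_name, header_value in headers.items():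
--         if header_name not in STATE_HINT_HEADERS:
--             continue
--         lowered = header_value.lower()
--         if "hit" in lowered:
--             states.add("hit")
--         if "stale" in lowered:
--             states.add("stale")
--         if "fresh" in lowered:
--             states.add("fresh")
--     return states
-- ===== SOURCE B (Python) =====
-- STATE_HINT_HEADERS = {
--     "cache-status",
--     "x-cache",
--     "x-cache-status",
--     "x-cache-result",
--     "cf-cache-status",
--     "x-vercel-cache",
--     "x-nextjs-cache",
--     "x-cache-hit",
--     "x-cache-state",
--     "x-ft-cache-status",
--     "x-ft-cache-state",
--     "x-hot-cache-status",
-- }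
--
--
-- def _infer_cache_states(headers: dict[str, str]) -> set[str]:
--     # Worklist algorithm: keep the states NOT yet found; per relevant header,
--     # move the matched ones out of the worklist; stop once nothing is pending.
--     pending = ["hit", "stale", "fresh"]
--     found: list[str] = []
--     for name, value in headers.items():
--         if not pending:
--             break
--         if name in STATE_HINT_HEADERS:
--             lowered = value.lower()
--             matched = [s for s in pending if s in lowered]
--             pending = [s for s in pending if s not in lowered]
--             found += matched
--     return set(found)
-- ===== Notes on version B (the rewrite author's own statement) =====
-- stated objective: alternative
-- what changed: B replaces A's growing result set with three membership-checked adds per header by a shrinking worklist of not-yet-found states that is partitioned against each relevant header value, with an early break once the worklist is empty.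
import Mathlib
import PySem

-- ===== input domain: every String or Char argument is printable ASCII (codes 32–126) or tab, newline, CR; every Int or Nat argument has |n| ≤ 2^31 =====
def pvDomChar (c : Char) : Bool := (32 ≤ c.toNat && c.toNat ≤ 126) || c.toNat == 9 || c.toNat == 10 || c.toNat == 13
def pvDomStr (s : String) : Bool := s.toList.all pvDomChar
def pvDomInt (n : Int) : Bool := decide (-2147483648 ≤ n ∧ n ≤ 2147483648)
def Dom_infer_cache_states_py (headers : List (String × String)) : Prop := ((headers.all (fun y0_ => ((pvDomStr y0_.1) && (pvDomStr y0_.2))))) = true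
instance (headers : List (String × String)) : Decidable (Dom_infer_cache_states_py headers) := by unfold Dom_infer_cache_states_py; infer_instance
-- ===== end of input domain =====

-- B replaces A's growing result set (three membership-checked adds per relevant header) by a
-- shrinking worklist of not-yet-found states, partitioned per relevant header, with early
-- exit once nothing is pending; objective: alternative (same asymptotic cost).

-- STATE_HINT_HEADERS (a module-level set literal, shared by both programs)
def pvHintHeaders : PySem.Set String := PySem.Set.ofList
  ["cache-status", "x-cache", "x-cache-status", "x-cache-result", "cf-cache-status",
   "x-vercel-cache", "x-nextjs-cache", "x-cache-hit", "x-cache-state",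
   "x-ft-cache-status", "x-ft-cache-state", "x-hot-cache-status"]

-- ===== PORT A =====
-- loop body of A: skip irrelevant headers, then three independent conditional adds
def pvStepA (states : List String) (p : String × String) : List String :=
  if ¬ (PySem.Set.contains pvHintHeaders p.1) then states
  else
    let lowered := PySem.Str.lower p.2
    let states := if PySem.Str.isIn "hit" lowered then PySem.Set.add states "hit" else states
    let states := if PySem.Str.isIn "stale" lowered then PySem.Set.add states "stale" else states
    if PySem.Str.isIn "fresh" lowered then PySem.Set.add states "fresh" else states

def infer_cache_states_py (headers : List (String × String)) : List String :=
  headers.foldl pvStepA []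

-- ===== PORT B =====
-- B's loop: worklist `pending` of states not found yet, accumulator `found`;
-- break when `pending` is empty, else partition `pending` by the lowered value.
def pvLoopB : List (String × String) → List String → List String → List String
  | [], _, found => found
  | (name, value) :: rest, pending, found =>
    if pending.isEmpty then found
    else if PySem.Set.contains pvHintHeaders name then
      let lowered := PySem.Str.lower value
      let matched := pending.filter (fun s => PySem.Str.isIn s lowered)
      let pending' := pending.filter (fun s => !(PySem.Str.isIn s lowered))
      pvLoopB rest pending' (found ++ matched)
    else pvLoopB rest pending found

def infer_cache_states_py_alt (headers : List (String × String)) : List String :=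
  PySem.Set.ofList (pvLoopB headers ["hit", "stale", "fresh"] [])

-- ===== PRECONDITION & SPEC =====
def Spec_infer_cache_states_py (headers : List (String × String)) (out : List String) : Prop := out = infer_cache_states_py_alt headers
instance (headers : List (String × String)) (out : List String) : Decidable (Spec_infer_cache_states_py headers out) := by unfold Spec_infer_cache_states_py; infer_instance

-- ===== CLAIM (what is proved, stated in full; the proofs are below) =====
def Claim_equal_infer_cache_states_py : Prop := ∀ (headers : List (String × String)), Dom_infer_cache_states_py headers → Spec_infer_cache_states_py headers (infer_cache_states_py headers)

-- ===== LEMMAS AND PROOFS =====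

-- B's worklist, as a function of A's accumulator: the states not found yet
def pvPending (found : List String) : List String :=
  ["hit", "stale", "fresh"].filter (fun s => !found.contains s)

-- once all three states are in `states`, A's loop body is the identity
theorem pvStepA_of_all_mem (states : List String) (p : String × String)
    (h1 : "hit" ∈ states) (h2 : "stale" ∈ states) (h3 : "fresh" ∈ states) :
    pvStepA states p = states := by
  unfold pvStepA
  split_ifs <;> simp_all [PySem.Set.add, PySem.Set.contains]

theorem pvFoldA_of_all_mem (headers : List (String × String)) :
    ∀ states : List String, "hit" ∈ states → "stale" ∈ states → "fresh" ∈ states →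
    headers.foldl pvStepA states = states := by
  induction headers with
  | nil => intro s _ _ _; rfl
  | cons p t ih =>
      intro s h1 h2 h3
      simp only [List.foldl_cons, pvStepA_of_all_mem s p h1 h2 h3]
      exact ih s h1 h2 h3

-- per-header step, relevant header: B's new accumulator is A's loop body
theorem pvStep_found (found : List String) (p : String × String)
    (hrel : PySem.Set.contains pvHintHeaders p.1 = true) :
    found ++ (pvPending found).filter (fun s => PySem.Str.isIn s (PySem.Str.lower p.2))
      = pvStepA found p := by
  unfold pvPending pvStepA
  by_cases b1 : "hit" ∈ found <;> by_cases b2 : "stale" ∈ found <;>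
    by_cases b3 : "fresh" ∈ found <;>
  by_cases m1 : PySem.Str.isIn "hit" (PySem.Str.lower p.2) = true <;>
    by_cases m2 : PySem.Str.isIn "stale" (PySem.Str.lower p.2) = true <;>
      by_cases m3 : PySem.Str.isIn "fresh" (PySem.Str.lower p.2) = true <;>
  simp_all [List.filter]

-- per-header step, relevant header: B's new worklist matches A's new accumulator
theorem pvStep_pending (found : List String) (p : String × String)
    (hrel : PySem.Set.contains pvHintHeaders p.1 = true) :
    (pvPending found).filter (fun s => !(PySem.Str.isIn s (PySem.Str.lower p.2)))
      = pvPending (pvStepA found p) := by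
  unfold pvPending pvStepA
  by_cases b1 : "hit" ∈ found <;> by_cases b2 : "stale" ∈ found <;>
    by_cases b3 : "fresh" ∈ found <;>
  by_cases m1 : PySem.Str.isIn "hit" (PySem.Str.lower p.2) = true <;>
    by_cases m2 : PySem.Str.isIn "stale" (PySem.Str.lower p.2) = true <;>
      by_cases m3 : PySem.Str.isIn "fresh" (PySem.Str.lower p.2) = true <;>
  simp_all [List.filter]

-- invariant: with `pending` the keywords not yet in `found`, B's loop is A's fold
theorem pvLoopB_eq_foldA (headers : List (String × String)) :
    ∀ found : List String,
      pvLoopB headers (pvPending found) found = headers.foldl pvStepA found := by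
  induction headers with
  | nil => intro found; rfl
  | cons p t ih =>
      intro found
      obtain ⟨name, value⟩ := p
      simp only [pvLoopB, List.foldl_cons]
      by_cases hemp : (pvPending found).isEmpty
      · -- worklist empty: B breaks; A's fold adds nothing any more
        rw [List.isEmpty_iff] at hemp
        have hall : ∀ s ∈ ["hit", "stale", "fresh"], (!found.contains s) = false := by
          intro s hs
          have := List.filter_eq_nil_iff.mp hemp s hs
          simpa using this
        have h1 : "hit" ∈ found := by have := hall "hit" (by simp); simpa using this
        have h2 : "stale" ∈ found := by have := hall "stale" (by simp); simpa using this
        have h3 : "fresh" ∈ found := by have := hall "fresh" (by simp); simpa using this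
        rw [if_pos (by rw [List.isEmpty_iff]; exact hemp),
            pvStepA_of_all_mem found (name, value) h1 h2 h3,
            pvFoldA_of_all_mem t found h1 h2 h3]
      · rw [if_neg hemp]
        by_cases hrel : PySem.Set.contains pvHintHeaders name
        · rw [if_pos hrel]
          rw [pvStep_pending found (name, value) hrel, pvStep_found found (name, value) hrel]
          exact ih (pvStepA found (name, value))
        · rw [if_neg hrel]
          have hstep : pvStepA found (name, value) = found := by
            unfold pvStepA
            rw [if_pos (by simpa using hrel)]
          rw [hstep]
          exact ih found
-- A's fold keeps the accumulator duplicate-free (it only uses Set.add)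
theorem pvNodup_ite (c : Prop) [Decidable c] (s : List String) (x : String)
    (h : s.Nodup) : (if c then PySem.Set.add s x else s).Nodup := by
  split
  · exact PySem.Set.nodup_add _ _ h
  · exact h

theorem pvStepA_nodup (states : List String) (p : String × String) (h : states.Nodup) :
    (pvStepA states p).Nodup := by
  unfold pvStepA
  split
  · exact h
  · exact pvNodup_ite _ _ _ (pvNodup_ite _ _ _ (pvNodup_ite _ _ _ h))

theorem pvFoldA_nodup (headers : List (String × String)) :
    ∀ states : List String, states.Nodup → (headers.foldl pvStepA states).Nodup := by
  induction headers with
  | nil => intro s h; exact h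
  | cons p t ih =>
      intro s h
      exact ih _ (pvStepA_nodup s p h)

-- ===== VERDICT (by name: the statement is the Claim_ definition above) =====
theorem infer_cache_states_py_spec : Claim_equal_infer_cache_states_py := by
  intro headers _
  unfold Spec_infer_cache_states_py infer_cache_states_py infer_cache_states_py_alt
  have h := pvLoopB_eq_foldA headers []
  have hpend : pvPending [] = ["hit", "stale", "fresh"] := by decide
  rw [hpend] at h
  rw [h]
  exact (PySem.Set.ofList_eq_self_of_nodup _ (pvFoldA_nodup headers [] List.nodup_nil)).symm
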